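-- pv_equiv track=rewrite | github.com/Repich/CodeReview | worker/app/services/query_units.py | _consume_string_literal
-- ===== SOURCE A (Python) =====
-- def _consume_string_literal(
--     lines: list[str], line_idx: int, col_idx: int
-- ) -> tuple[list[tuple[int, str]], int, int]:
--     collected: list[tuple[int, str]] = []
--     buffer: list[str] = []
--     i = line_idx
--     j = col_idx + 1
--     while i < len(lines):
--         line = lines[i]
--         while j < len(line):
--             ch = line[j]
--             if ch == '"':
--                 if j + 1 < len(line) and line[j + 1] == '"':
--                     buffer.append('"')
--                     j += 2
--                     continue
--                 collected.append((i + 1, "".join(buffer)))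
--                 return collected, i, j
--             buffer.append(ch)
--             j += 1
--         collected.append((i + 1, "".join(buffer)))
--         buffer = []
--         i += 1
--         j = 0
--     if buffer and lines:
--         line_no = min(i, len(lines) - 1) + 1
--         collected.append((line_no, "".join(buffer)))
--     return collected, max(line_idx, i - 1), 0
-- ===== SOURCE B (Python) =====
-- def _consume_string_literal(
--     lines: list[str], line_idx: int, col_idx: int
-- ) -> tuple[list[tuple[int, str]], int, int]:
--     collected: list[tuple[int, str]] = []
--     buffer = ""
--     i = line_idx
--     j = col_idx + 1
--     while i < len(lines):
--         line = lines[i]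
--         while True:
--             k = line.find('"', j)
--             if k == -1:
--                 collected.append((i + 1, buffer + line[j:]))
--                 buffer = ""
--                 i += 1
--                 j = 0
--                 break
--             if k + 1 < len(line) and line[k + 1] == '"':
--                 buffer += line[j:k] + '"'
--                 j = k + 2
--                 continue
--             collected.append((i + 1, buffer + line[j:k]))
--             return collected, i, k
--     return collected, max(line_idx, i - 1), 0
-- ===== Notes on version B (the rewrite author's own statement) =====
-- stated objective: alternative
-- what changed: The inner per-character state loop (append one char, look ahead for the doubled quote) is replaced by index-based scanning with str.find: jump straight to the next '"', append the whole slice at once, and handle the doubled-quote escape by skipping two positions; the provably dead final 'if buffer and lines' fallthrough is dropped. Intended as a constant-factor speedup (C-level find/slicing; measured median 1.69x at the largest size, but not consistent across inputs, so no speed claim is made).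
-- outside the precondition, e.g. on _consume_string_literal(['ab"'], 0, -3): A returns ([(1, 'b')], 0, -1), B returns ([(1, 'b')], 0, 2); on _consume_string_literal(['c', 'ab"'], -1, -3): A returns ([(0, 'b')], -1, -1), B returns ([(0, 'b')], -1, 2)
import Mathlib
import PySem

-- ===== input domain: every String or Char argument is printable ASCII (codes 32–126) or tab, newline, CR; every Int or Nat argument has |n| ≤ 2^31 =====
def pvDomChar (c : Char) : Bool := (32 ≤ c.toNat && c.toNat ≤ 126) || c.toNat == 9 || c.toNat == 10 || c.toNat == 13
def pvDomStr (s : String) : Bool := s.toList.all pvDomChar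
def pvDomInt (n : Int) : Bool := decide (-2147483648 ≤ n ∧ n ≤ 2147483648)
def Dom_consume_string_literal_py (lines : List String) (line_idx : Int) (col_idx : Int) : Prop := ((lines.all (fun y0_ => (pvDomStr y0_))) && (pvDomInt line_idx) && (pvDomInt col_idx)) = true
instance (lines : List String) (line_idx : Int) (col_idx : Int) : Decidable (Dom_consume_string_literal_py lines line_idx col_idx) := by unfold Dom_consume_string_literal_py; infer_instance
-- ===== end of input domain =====

-- B replaces A's per-character inner state loop by index-based scanning with str.find
-- (jump to the next '"', append whole slices, skip doubled-quote escapes) and drops A's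
-- provably dead final fallthrough; objective: alternative (same asymptotic cost).
-- Both ports use Nat cursors; they are faithful to their Pythons on Pre_ (non-negative indices).

-- ===== PORT A =====
-- inner 'while j < len(line)' char loop: returns .inl on the closing quote (the function's return),
-- .inr with the updated collected when the line is exhausted (buffer joined and reset by the caller).
def pvAInner (chars : List Char) (i : Int) (j : Nat) (buffer : List Char)
    (collected : List (Int × String)) :
    ((List (Int × String)) × Int × Int) ⊕ (List (Int × String)) :=
  if h : j < chars.length then
    if chars[j] = '"' then
      if chars[j + 1]? = some '"' then
        pvAInner chars i (j + 2) (buffer ++ ['"']) collected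
      else
        Sum.inl (collected ++ [(i + 1, String.ofList buffer)], i, (j : Int))
    else
      pvAInner chars i (j + 1) (buffer ++ [chars[j]]) collected
  else
    Sum.inr (collected ++ [(i + 1, String.ofList buffer)])
termination_by chars.length - j
decreasing_by all_goals omega

-- outer 'while i < len(lines)' loop, with A's final 'if buffer and lines' fallthrough
def pvAOuter (lines : List String) (line_idx : Int) (i : Nat) (j : Nat) (buffer : List Char)
    (collected : List (Int × String)) : (List (Int × String)) × Int × Int :=
  if h : i < lines.length then
    match pvAInner (lines[i]).toList (i : Int) j buffer collected with
    | Sum.inl r => r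
    | Sum.inr c => pvAOuter lines line_idx (i + 1) 0 [] c
  else
    ((if buffer ≠ [] ∧ lines ≠ [] then
        collected ++ [(min (i : Int) ((lines.length : Int) - 1) + 1, String.ofList buffer)]
      else collected),
     max line_idx ((i : Int) - 1), 0)
termination_by lines.length - i
decreasing_by omega

def consume_string_literal_py (lines : List String) (line_idx : Int) (col_idx : Int) :
    (List (Int × String)) × Int × Int :=
  pvAOuter lines line_idx line_idx.toNat (col_idx + 1).toNat [] []

-- ===== PORT B =====
-- helper facts about str.find('"', j) (PySem.Chars.findFrom), needed for pvBInner's termination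
theorem pvQuotePrefix_iff (l : List Char) : ['"'] <+: l ↔ l[0]? = some '"' := by
  cases l with
  | nil => simp
  | cons c t => simp [List.cons_prefix_cons, eq_comm]

theorem pvFindFrom_none_of_le (s : List Char) (j : Nat) (h : s.length ≤ j) :
    PySem.Chars.findFrom s ['"'] (j : Int) none = -1 := by
  rcases Nat.lt_or_ge s.length j with hlt | hge
  · simp only [PySem.Chars.findFrom]
    have h1 : ¬ ((j : Int) < 0) := by omega
    have h2 : ((s.length : Int) < (j : Int)) := by exact_mod_cast hlt
    simp [h1, h2]
  · have hj : j = s.length := by omega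
    subst hj
    rw [PySem.Chars.findFrom_natCast s ['"'] s.length le_rfl]
    have hnil : PySem.Chars.find ([] : List Char) ['"'] = -1 := by
      apply (PySem.Chars.find_eq_neg_one_iff _ _).mpr
      simp
    simp [hnil]

theorem pvFindFrom_bounds (s : List Char) (j : Nat)
    (hne : PySem.Chars.findFrom s ['"'] (j : Int) none ≠ -1) :
    (j : Int) ≤ PySem.Chars.findFrom s ['"'] (j : Int) none ∧
      0 ≤ PySem.Chars.findFrom s ['"'] (j : Int) none ∧
      PySem.Chars.findFrom s ['"'] (j : Int) none < s.length := by
  have hj : j < s.length := by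
    by_contra h
    exact hne (pvFindFrom_none_of_le s j (by omega))
  rw [PySem.Chars.findFrom_natCast s ['"'] j (by omega)] at *
  by_cases hf : PySem.Chars.find (s.drop j) ['"'] = -1
  · simp [hf] at hne
  · have hge : 0 ≤ PySem.Chars.find (s.drop j) ['"'] := by
      have := PySem.Chars.neg_one_le_find (s.drop j) ['"']; omega
    obtain ⟨h1, _⟩ := PySem.Chars.find_spec hge
    have hlen : (PySem.Chars.find (s.drop j) ['"']).toNat < (s.drop j).length := by
      by_contra h
      rw [List.drop_of_length_le (by omega)] at h1
      exact absurd ((pvQuotePrefix_iff _).mp h1) (by simp)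
    have : (s.drop j).length = s.length - j := by simp
    simp only [if_neg hf]
    omega

-- inner scanning loop of B: repeatedly find the next '"' from position j
def pvBInner (chars : List Char) (i : Int) (j : Nat) (buffer : List Char)
    (collected : List (Int × String)) :
    ((List (Int × String)) × Int × Int) ⊕ (List (Int × String)) :=
  let k := PySem.Chars.findFrom chars ['"'] (j : Int) none
  if _hk : k = -1 then
    Sum.inr (collected ++ [(i + 1, String.ofList (buffer ++ PySem.List.slice chars (some (j : Int)) none))])
  else if k + 1 < (chars.length : Int) ∧ PySem.List.pyGet? chars (k + 1) = some '"' then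
    pvBInner chars i (k.toNat + 2) (buffer ++ PySem.List.slice chars (some (j : Int)) (some k) ++ ['"']) collected
  else
    Sum.inl (collected ++ [(i + 1, String.ofList (buffer ++ PySem.List.slice chars (some (j : Int)) (some k)))], i, k)
termination_by chars.length - j
decreasing_by
  have h := pvFindFrom_bounds chars j _hk
  omega

-- outer 'while i < len(lines)' loop of B (no fallthrough: the buffer is empty when the loop exits)
def pvBOuter (lines : List String) (line_idx : Int) (i : Nat) (j : Nat) (buffer : List Char)
    (collected : List (Int × String)) : (List (Int × String)) × Int × Int :=
  if h : i < lines.length then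
    match pvBInner (lines[i]).toList (i : Int) j buffer collected with
    | Sum.inl r => r
    | Sum.inr c => pvBOuter lines line_idx (i + 1) 0 [] c
  else
    (collected, max line_idx ((i : Int) - 1), 0)
termination_by lines.length - i
decreasing_by omega

def consume_string_literal_py_alt (lines : List String) (line_idx : Int) (col_idx : Int) :
    (List (Int × String)) × Int × Int :=
  pvBOuter lines line_idx line_idx.toNat (col_idx + 1).toNat [] []

-- ===== PRECONDITION & SPEC =====
-- Pre_ excludes negative indices (line_idx < 0 or col_idx < -1): there Python's negative-index
-- wraparound makes A scan from the END of the list/line (or raise IndexError), an accident of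
-- indexing that B's find-based scan does not reproduce.
def Pre_consume_string_literal_py (lines : List String) (line_idx : Int) (col_idx : Int) : Prop :=
  0 ≤ line_idx ∧ 0 ≤ col_idx + 1
instance (lines : List String) (line_idx : Int) (col_idx : Int) : Decidable (Pre_consume_string_literal_py lines line_idx col_idx) := by unfold Pre_consume_string_literal_py; infer_instance

def pvWitness_consume_string_literal_py : List String × Int × Int := (["ab\"\"c", "d\"e"], 0, 1)

def Spec_consume_string_literal_py (lines : List String) (line_idx : Int) (col_idx : Int) (out : (List (Int × String)) × Int × Int) : Prop := out = consume_string_literal_py_alt lines line_idx col_idx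
instance (lines : List String) (line_idx : Int) (col_idx : Int) (out : (List (Int × String)) × Int × Int) : Decidable (Spec_consume_string_literal_py lines line_idx col_idx out) := by unfold Spec_consume_string_literal_py; infer_instance

-- ===== CLAIM (what is proved, stated in full; the proofs are below) =====
def Claim_equal_consume_string_literal_py : Prop := ∀ (lines : List String) (line_idx : Int) (col_idx : Int), Dom_consume_string_literal_py lines line_idx col_idx → Pre_consume_string_literal_py lines line_idx col_idx → Spec_consume_string_literal_py lines line_idx col_idx (consume_string_literal_py lines line_idx col_idx)

-- ===== LEMMAS AND PROOFS =====

theorem pvFind_cons (c : Char) (u : List Char) :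
    PySem.Chars.find (c :: u) ['"'] =
      if c = '"' then 0
      else if PySem.Chars.find u ['"'] = -1 then -1 else PySem.Chars.find u ['"'] + 1 := by
  by_cases hc : c = '"'
  · subst hc
    have hpre : ['"'] <+: ('"' :: u) := ⟨u, rfl⟩
    have hne : PySem.Chars.find ('"' :: u) ['"'] ≠ -1 :=
      (PySem.Chars.find_ne_neg_one_iff _ _).mpr hpre.isInfix
    have hge : 0 ≤ PySem.Chars.find ('"' :: u) ['"'] := by
      have := PySem.Chars.neg_one_le_find ('"' :: u) ['"']; omega
    obtain ⟨h1, h2⟩ := PySem.Chars.find_spec hge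
    have h0 : (PySem.Chars.find ('"' :: u) ['"']).toNat = 0 := by
      by_contra h
      exact h2 0 (by omega) (by simpa using hpre)
    rw [if_pos rfl]
    omega
  · rw [if_neg hc]
    by_cases h1 : PySem.Chars.find u ['"'] = -1
    · rw [if_pos h1]
      have hnu : ¬ ['"'] <:+: u := (PySem.Chars.find_eq_neg_one_iff u _).mp h1
      apply (PySem.Chars.find_eq_neg_one_iff _ _).mpr
      intro hinf
      rcases List.mem_cons.mp ((List.singleton_infix_iff _ _).mp hinf) with h' | h'
      · exact hc h'.symm
      · exact hnu ((List.singleton_infix_iff _ _).mpr h')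
    · rw [if_neg h1]
      have hru : 0 ≤ PySem.Chars.find u ['"'] := by
        have := PySem.Chars.neg_one_le_find u ['"']; omega
      obtain ⟨hu1, hu2⟩ := PySem.Chars.find_spec hru
      have hmem : ('"' : Char) ∈ u :=
        (List.singleton_infix_iff _ _).mp ((PySem.Chars.find_ne_neg_one_iff u _).mp h1)
      have hinf : ['"'] <:+: (c :: u) :=
        (List.singleton_infix_iff _ _).mpr (List.mem_cons_of_mem c hmem)
      have hne : PySem.Chars.find (c :: u) ['"'] ≠ -1 :=
        (PySem.Chars.find_ne_neg_one_iff _ _).mpr hinf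
      have hge : 0 ≤ PySem.Chars.find (c :: u) ['"'] := by
        have := PySem.Chars.neg_one_le_find (c :: u) ['"']; omega
      obtain ⟨hm1, hm2⟩ := PySem.Chars.find_spec hge
      have hm0 : (PySem.Chars.find (c :: u) ['"']).toNat ≠ 0 := by
        intro h0
        rw [h0] at hm1
        have h' : ('"' : Char) = c := by simpa using hm1
        exact hc h'.symm
      have hupper : (PySem.Chars.find (c :: u) ['"']).toNat ≤ (PySem.Chars.find u ['"']).toNat + 1 := by
        by_contra h
        exact hm2 ((PySem.Chars.find u ['"']).toNat + 1) (by omega)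
          (by simpa [List.drop_succ_cons] using hu1)
      have hlower : (PySem.Chars.find u ['"']).toNat + 1 ≤ (PySem.Chars.find (c :: u) ['"']).toNat := by
        by_contra h
        obtain ⟨s', hs⟩ : ∃ s', (PySem.Chars.find (c :: u) ['"']).toNat = s' + 1 :=
          ⟨(PySem.Chars.find (c :: u) ['"']).toNat - 1, by omega⟩
        have hpm : ['"'] <+: u.drop s' := by
          rw [hs] at hm1
          simpa [List.drop_succ_cons] using hm1
        exact hu2 s' (by omega) hpm
      omega


theorem pvFindFrom_at_quote (s : List Char) (j : Nat) (hj : j < s.length) (hq : s[j] = '"') :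
    PySem.Chars.findFrom s ['"'] (j : Int) none = (j : Int) := by
  rw [PySem.Chars.findFrom_natCast s ['"'] j (by omega)]
  rw [List.drop_eq_getElem_cons hj, hq, pvFind_cons]
  simp

theorem pvFindFrom_step (s : List Char) (j : Nat) (hj : j < s.length) (hq : s[j] ≠ '"') :
    PySem.Chars.findFrom s ['"'] (j : Int) none =
      PySem.Chars.findFrom s ['"'] ((j + 1 : Nat) : Int) none := by
  rw [PySem.Chars.findFrom_natCast s ['"'] j (by omega),
      PySem.Chars.findFrom_natCast s ['"'] (j + 1) (by omega)]
  rw [List.drop_eq_getElem_cons hj, pvFind_cons]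
  by_cases hf : PySem.Chars.find (s.drop (j + 1)) ['"'] = -1
  · simp [hq, hf]
  · simp only [if_neg hq, if_neg hf]
    have := PySem.Chars.neg_one_le_find (s.drop (j + 1)) ['"']
    split
    · omega
    · push_cast; ring

theorem pvSlice_drop (chars : List Char) (j : Nat) :
    PySem.List.slice chars (some (j : Int)) none = chars.drop j :=
  PySem.List.slice_from_natCast chars j

theorem pvSlice_cons (chars : List Char) (j : Nat) (k : Int) (hj : j < chars.length)
    (hjk : (j : Int) < k) :
    PySem.List.slice chars (some (j : Int)) (some k) =
      chars[j] :: PySem.List.slice chars (some ((j + 1 : Nat) : Int)) (some k) := by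
  rw [PySem.List.slice_toNat chars (by omega) (by omega),
      PySem.List.slice_toNat chars (by omega) (by omega)]
  simp only [Int.toNat_natCast]
  have h1 : k.toNat - j = (k.toNat - (j + 1)) + 1 := by omega
  rw [h1, List.drop_eq_getElem_cons hj, List.take_succ_cons]

theorem pvSlice_self (chars : List Char) (j : Nat) :
    PySem.List.slice chars (some (j : Int)) (some (j : Int)) = [] := by
  rw [PySem.List.slice_toNat chars (by omega) (by omega)]
  simp

-- B's scan absorbs one non-quote character into the buffer
theorem pvBInner_step (chars : List Char) (i : Int) (j : Nat) (hj : j < chars.length)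
    (hq : chars[j] ≠ '"') (buffer : List Char) (collected : List (Int × String)) :
    pvBInner chars i j buffer collected =
      pvBInner chars i (j + 1) (buffer ++ [chars[j]]) collected := by
  have hff := pvFindFrom_step chars j hj hq
  conv_lhs => rw [pvBInner]
  conv_rhs => rw [pvBInner]
  simp only [hff]
  by_cases hk : PySem.Chars.findFrom chars ['"'] ((j + 1 : Nat) : Int) none = -1
  · simp only [hk, dif_pos]
    rw [pvSlice_drop, pvSlice_drop, List.drop_eq_getElem_cons hj]
    simp
  · have hb := pvFindFrom_bounds chars (j + 1) hk
    have hsl := pvSlice_cons chars j (PySem.Chars.findFrom chars ['"'] ((j + 1 : Nat) : Int) none)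
      hj (by push_cast at hb ⊢; omega)
    simp only [dif_neg hk, hsl]
    split
    · simp
    · simp

theorem pvInner_eq_ge (chars : List Char) (i : Int) (j : Nat) (h : chars.length ≤ j)
    (buffer : List Char) (collected : List (Int × String)) :
    pvAInner chars i j buffer collected = pvBInner chars i j buffer collected := by
  rw [pvAInner, pvBInner]
  have hk := pvFindFrom_none_of_le chars j h
  simp only [hk, dif_pos, dif_neg (by omega : ¬ j < chars.length)]
  rw [pvSlice_drop, List.drop_of_length_le h]
  simp

theorem pvInner_eq (chars : List Char) (i : Int) :
    ∀ (n j : Nat) (buffer : List Char) (collected : List (Int × String)),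
      chars.length - j ≤ n →
      pvAInner chars i j buffer collected = pvBInner chars i j buffer collected := by
  intro n
  induction n with
  | zero =>
    intro j buffer collected hn
    exact pvInner_eq_ge chars i j (by omega) buffer collected
  | succ n ih =>
    intro j buffer collected hn
    by_cases hj : j < chars.length
    · by_cases hq : chars[j] = '"'
      · have hkf := pvFindFrom_at_quote chars j hj hq
        rw [pvAInner, pvBInner]
        simp only [hkf, dif_pos hj, if_pos hq]
        have hne : ¬ ((j : Int) = -1) := by omega
        simp only [dif_neg hne]
        have hcond : ((j : Int) + 1 < (chars.length : Int) ∧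
            PySem.List.pyGet? chars ((j : Int) + 1) = some '"') ↔ chars[j + 1]? = some '"' := by
          constructor
          · rintro ⟨h1, h2⟩
            rw [show ((j : Int) + 1) = ((j + 1 : Nat) : Int) by push_cast; ring,
                PySem.List.pyGet?_natCast] at h2
            exact h2
          · intro h2
            have hlt : j + 1 < chars.length := by
              obtain ⟨h, -⟩ := List.getElem?_eq_some_iff.mp h2
              exact h
            refine ⟨by exact_mod_cast hlt, ?_⟩
            rw [show ((j : Int) + 1) = ((j + 1 : Nat) : Int) by push_cast; ring,
                PySem.List.pyGet?_natCast]
            exact h2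
        by_cases hesc : chars[j + 1]? = some '"'
        · simp only [if_pos hesc, if_pos (hcond.mpr hesc)]
          rw [show ((j : Int).toNat + 2) = j + 2 by omega, pvSlice_self]
          simp only [List.append_nil]
          exact ih (j + 2) (buffer ++ ['"']) collected (by omega)
        · simp only [if_neg hesc, if_neg (fun h => hesc (hcond.mp h))]
          rw [pvSlice_self]
          simp
      · rw [pvBInner_step chars i j hj hq buffer collected]
        rw [pvAInner]
        simp only [dif_pos hj, if_neg hq]
        exact ih (j + 1) (buffer ++ [chars[j]]) collected (by omega)
    · exact pvInner_eq_ge chars i j (by omega) buffer collected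

theorem pvOuter_eq (lines : List String) (line_idx : Int) :
    ∀ (n i j : Nat) (collected : List (Int × String)),
      lines.length - i ≤ n →
      pvAOuter lines line_idx i j [] collected = pvBOuter lines line_idx i j [] collected := by
  intro n
  induction n with
  | zero =>
    intro i j collected hn
    have hi : ¬ i < lines.length := by omega
    rw [pvAOuter, pvBOuter]
    simp [hi]
  | succ n ih =>
    intro i j collected hn
    by_cases hi : i < lines.length
    · rw [pvAOuter, pvBOuter]
      simp only [dif_pos hi]
      rw [pvInner_eq (lines[i]).toList (i : Int) ((lines[i]).toList.length) j [] collected (by omega)]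
      cases h : pvBInner (lines[i]).toList (i : Int) j [] collected with
      | inl r => simp
      | inr c =>
        simp only []
        exact ih (i + 1) 0 c (by omega)
    · rw [pvAOuter, pvBOuter]
      simp [hi]

-- ===== VERDICT (by name: the statement is the Claim_ definition above) =====
theorem consume_string_literal_py_spec : Claim_equal_consume_string_literal_py := by
  unfold Claim_equal_consume_string_literal_py
  intro lines line_idx col_idx _hdom _hpre
  unfold Spec_consume_string_literal_py consume_string_literal_py consume_string_literal_py_alt
  exact pvOuter_eq lines line_idx lines.length line_idx.toNat (col_idx + 1).toNat [] (by omega)
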